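-- pv_equiv track=rewrite | github.com/sg-moomin/Study__Algorithm_CodingTest | programmers/파이썬/[2018 KAKAO BLIND RECRUITMENT] 비밀지도.py | solution
-- ===== SOURCE A (Python) =====
-- def solution(n, arr1, arr2):
--     leftList = []
--     rightList = []
--     result = []
--
--     for i in range(n):
--         twos = format(arr1[i], 'b')
--         twos1 = format(arr2[i], 'b')
--
--
--         while n > len(twos):
--             if n != len(twos):
--                 twos = '0' + twos
--
--         while n > len(twos1):
--             if n != len(twos1):
--                 twos1 = '0' + twos1
--
--         leftList.append(twos)
--         rightList.append(twos1)
--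
--
--     for i in range(n):
--         tmp = ''
--         for j in range(n):
--             if leftList[i][j] == '1' or rightList[i][j] == '1':
--                 tmp = tmp + '#'
--             else:
--                 tmp = tmp + ' '
--
--         result.append(tmp)
--
--     return result;
-- ===== SOURCE B (Python) =====
-- def solution(n, arr1, arr2):
--     result = []
--     for i in range(n):
--         marks = set()
--         for v in (arr1[i], arr2[i]):
--             s = format(v, 'b')
--             pad = n - len(s)
--             if pad < 0:
--                 pad = 0
--             for j, c in enumerate(s):
--                 if c == '1':
--                     marks.add(pad + j)
--         result.append(''.join('#' if j in marks else ' ' for j in range(n)))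
--     return result
-- ===== Notes on version B (the rewrite author's own statement) =====
-- stated objective: faster
-- what changed: Instead of A's two precomputed zero-padded string lists (built by prepending '0' one character at a time) and its nested per-character '1'-comparison loop, B builds for each row a set of marked column indices (pad offset + position of each '1' in the two raw binary strings) and renders the row by set membership, so no padded strings are ever materialised.
import Mathlib
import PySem

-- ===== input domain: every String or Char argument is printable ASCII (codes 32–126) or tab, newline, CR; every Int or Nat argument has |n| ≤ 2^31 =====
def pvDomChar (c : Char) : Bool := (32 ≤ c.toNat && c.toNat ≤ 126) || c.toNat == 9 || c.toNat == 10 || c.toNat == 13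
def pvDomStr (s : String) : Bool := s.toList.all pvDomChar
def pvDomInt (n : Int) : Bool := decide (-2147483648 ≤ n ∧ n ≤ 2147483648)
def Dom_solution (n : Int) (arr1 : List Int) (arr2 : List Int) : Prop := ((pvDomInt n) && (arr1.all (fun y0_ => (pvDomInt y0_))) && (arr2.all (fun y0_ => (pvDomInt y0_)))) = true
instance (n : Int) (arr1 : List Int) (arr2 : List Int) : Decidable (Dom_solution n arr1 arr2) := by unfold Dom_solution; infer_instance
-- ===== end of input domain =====

-- B replaces A's two precomputed zero-padded string lists (built one '0' at a time) and its
-- nested per-character comparison loop by, per row, a set of marked column indices (pad offset +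
-- position of each '1' in the two raw binary strings) rendered by set membership.


-- ===== PORT A =====
-- while n > len(twos): twos = '0' + twos   (the inner 'if n != len(twos)' is always true there)
def padLoop (n : Int) (s : List Char) : List Char :=
  if n > (s.length : Int) then padLoop n ('0' :: s) else s
termination_by (n - s.length).toNat
decreasing_by simp only [List.length_cons]; omega

def solution (n : Int) (arr1 : List Int) (arr2 : List Int) : List String :=
  -- first loop: leftList/rightList of zero-padded binary strings (format(·,'b') = toBinChars)
  let leftList := (PySem.List.pyRange 0 n 1).map
    (fun i => padLoop n (PySem.Int.toBinChars (PySem.List.pyGetD arr1 i 0)))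
  let rightList := (PySem.List.pyRange 0 n 1).map
    (fun i => padLoop n (PySem.Int.toBinChars (PySem.List.pyGetD arr2 i 0)))
  -- second loop: per-character comparison building tmp by appending
  (PySem.List.pyRange 0 n 1).map (fun i =>
    String.ofList ((PySem.List.pyRange 0 n 1).foldl (fun tmp j =>
      tmp ++ [if PySem.List.pyGetD (PySem.List.pyGetD leftList i []) j ' ' = '1'
                 ∨ PySem.List.pyGetD (PySem.List.pyGetD rightList i []) j ' ' = '1'
              then '#' else ' ']) []))

-- ===== PORT B =====
-- inner loop: for j, c in enumerate(s): if c == '1': marks.add(pad + j)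
def addMarks (marks : PySem.Set Int) (pad : Int) (s : List Char) : PySem.Set Int :=
  (PySem.List.enumerate s).foldl
    (fun m p => if p.2 = '1' then PySem.Set.add m (pad + p.1) else m) marks

-- for v in (arr1[i], arr2[i]): s = format(v,'b'); pad = n - len(s); if pad < 0: pad = 0; mark
def rowSet (n : Int) (v1 v2 : Int) : PySem.Set Int :=
  let s1 := PySem.Int.toBinChars v1
  let pad1 := if n - (s1.length : Int) < 0 then 0 else n - (s1.length : Int)
  let m1 := addMarks PySem.Set.empty pad1 s1
  let s2 := PySem.Int.toBinChars v2
  let pad2 := if n - (s2.length : Int) < 0 then 0 else n - (s2.length : Int)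
  addMarks m1 pad2 s2

def solution_alt (n : Int) (arr1 : List Int) (arr2 : List Int) : List String :=
  (PySem.List.pyRange 0 n 1).foldl (fun result i =>
    result ++ [String.ofList ((PySem.List.pyRange 0 n 1).map (fun j =>
      if PySem.Set.contains
           (rowSet n (PySem.List.pyGetD arr1 i 0) (PySem.List.pyGetD arr2 i 0)) j
      then '#' else ' '))]) []

-- ===== PRECONDITION & SPEC =====
-- Pre_ excludes exactly the inputs where both Pythons raise IndexError: arr1[i]/arr2[i]
-- with n > len(arr1) or n > len(arr2).
def Pre_solution (n : Int) (arr1 : List Int) (arr2 : List Int) : Prop :=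
  n ≤ (arr1.length : Int) ∧ n ≤ (arr2.length : Int)
instance (n : Int) (arr1 : List Int) (arr2 : List Int) : Decidable (Pre_solution n arr1 arr2) := by
  unfold Pre_solution; infer_instance

def pvWitness_solution : Int × List Int × List Int := (2, [1, 2], [2, 1])

def Spec_solution (n : Int) (arr1 : List Int) (arr2 : List Int) (out : List String) : Prop := out = solution_alt n arr1 arr2
instance (n : Int) (arr1 : List Int) (arr2 : List Int) (out : List String) : Decidable (Spec_solution n arr1 arr2 out) := by unfold Spec_solution; infer_instance

-- ===== CLAIM (what is proved, stated in full; the proofs are below) =====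
def Claim_equal_solution : Prop := ∀ (n : Int) (arr1 : List Int) (arr2 : List Int), Dom_solution n arr1 arr2 → Pre_solution n arr1 arr2 → Spec_solution n arr1 arr2 (solution n arr1 arr2)

-- ===== LEMMAS AND PROOFS =====

theorem padLoop_eq (n : Int) (s : List Char) :
    padLoop n s = List.replicate (n.toNat - s.length) '0' ++ s := by
  fun_induction padLoop n s with
  | case1 s h ih =>
    rw [ih]
    have h1 : n.toNat - s.length = (n.toNat - (s.length + 1)) + 1 := by omega
    rw [h1, List.replicate_succ', List.append_assoc]
    simp
  | case2 s h =>
    have : n.toNat - s.length = 0 := by omega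
    simp [this]

-- membership in the fold collecting marked positions of s (enumeration starting at t)
theorem mem_marksFold (s : List Char) : ∀ (t : Int) (m : PySem.Set Int) (pad x : Int),
    (x ∈ (PySem.List.enumerate s t).foldl
        (fun m p => if p.2 = '1' then PySem.Set.add m (pad + p.1) else m) m)
      ↔ x ∈ m ∨ ∃ k : Nat, ∃ _ : k < s.length, s[k] = '1' ∧ x = pad + t + k := by
  induction s with
  | nil => intro t m pad x; simp [PySem.List.enumerate_nil]
  | cons c tl ih =>
    intro t m pad x
    rw [PySem.List.enumerate_cons]
    simp only [List.foldl_cons]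
    rw [ih (t + 1)]
    constructor
    · rintro (hm | ⟨k, hk, h1, hx⟩)
      · by_cases hc : c = '1'
        · rw [if_pos hc] at hm
          rcases (PySem.Set.mem_add m (pad + t) x).mp hm with hm | hx
          · exact Or.inl hm
          · exact Or.inr ⟨0, by simp, by simpa using hc, by push_cast; omega⟩
        · rw [if_neg hc] at hm
          exact Or.inl hm
      · exact Or.inr ⟨k + 1, by simpa using hk, by simpa using h1, by push_cast at hx ⊢; omega⟩
    · rintro (hm | ⟨k, hk, h1, hx⟩)
      · left
        by_cases hc : c = '1'
        · rw [if_pos hc]; exact (PySem.Set.mem_add m (pad + t) x).mpr (Or.inl hm)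
        · rw [if_neg hc]; exact hm
      · cases k with
        | zero =>
          left
          have hc : c = '1' := by simpa using h1
          rw [if_pos hc]
          exact (PySem.Set.mem_add m (pad + t) x).mpr (Or.inr (by push_cast at hx; omega))
        | succ k =>
          right
          exact ⟨k, by simpa using hk, by simpa using h1, by push_cast at hx ⊢; omega⟩

-- membership in addMarks
theorem mem_addMarks (m : PySem.Set Int) (pad x : Int) (s : List Char) :
    x ∈ addMarks m pad s ↔ x ∈ m ∨ ∃ k : Nat, ∃ _ : k < s.length, s[k] = '1' ∧ x = pad + k := by
  unfold addMarks
  rw [mem_marksFold s 0 m pad x]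
  simp

-- the j-th character of A's padded string is '1' exactly when B marks column j
theorem padLoop_char_one (n : Int) (s : List Char) (j : Int) (h0 : 0 ≤ j) (hj : j < n) :
    (PySem.List.pyGetD (padLoop n s) j ' ' = '1')
      ↔ ∃ k : Nat, ∃ _ : k < s.length, s[k] = '1' ∧
          j = (if n - (s.length : Int) < 0 then 0 else n - (s.length : Int)) + k := by
  have hpad : (if n - (s.length : Int) < 0 then 0 else n - (s.length : Int))
      = ((n.toNat - s.length : Nat) : Int) := by split_ifs <;> omega
  rw [hpad, padLoop_eq]
  have hjlen : j.toNat < (List.replicate (n.toNat - s.length) '0' ++ s).length := by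
    simp [List.length_append, List.length_replicate]; omega
  rw [show j = ((j.toNat : Nat) : Int) from by omega, PySem.List.pyGetD_natCast,
      List.getD_eq_getElem _ ' ' hjlen]
  by_cases hp : j.toNat < n.toNat - s.length
  · rw [List.getElem_append_left (by simpa using hp)]
    simp only [List.getElem_replicate]
    constructor
    · intro h; exact absurd h (by decide)
    · rintro ⟨k, hk, h1, hx⟩; omega
  · rw [List.getElem_append_right (by simpa using hp)]
    constructor
    · intro h
      refine ⟨j.toNat - (List.replicate (n.toNat - s.length) '0').length, ?_, h, ?_⟩
      · simp at hjlen ⊢; omega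
      · simp; omega
    · rintro ⟨k, hk, h1, hx⟩
      have : j.toNat - (List.replicate (n.toNat - s.length) '0').length = k := by
        simp; omega
      simp only [this]
      exact h1

-- pyGetD of the i-th row list (both lists are maps over the same range)
theorem pyGetD_rows (f : Int → List Char) (n i : Int) (h0 : 0 ≤ i) (hin : i < n) :
    PySem.List.pyGetD ((PySem.List.pyRange 0 n 1).map f) i [] = f i := by
  have hicast : (i.toNat : Int) = i := by omega
  rw [← hicast,
    show PySem.List.pyRange 0 n 1 = PySem.List.pyRange 0 (n.toNat : Int) 1 from by
      rw [show ((n.toNat : Int)) = n from by omega],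
    PySem.List.pyGetD_map_pyRange f n.toNat i.toNat [] (by omega), hicast]

-- ===== VERDICT (by name: the statement is the Claim_ definition above) =====
theorem solution_spec : Claim_equal_solution := by
  intro n arr1 arr2 _hdom _hpre
  unfold Spec_solution solution solution_alt
  simp only
  rw [PySem.List.foldl_append_singleton_eq_map, List.nil_append]
  apply List.map_congr_left
  intro i hi
  obtain ⟨hi0, hin⟩ := (PySem.List.mem_pyRange_one).mp hi
  set a := PySem.List.pyGetD arr1 i 0 with ha
  set b := PySem.List.pyGetD arr2 i 0 with hb
  rw [pyGetD_rows (fun j => padLoop n (PySem.Int.toBinChars (PySem.List.pyGetD arr1 j 0))) n i hi0 hin,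
      pyGetD_rows (fun j => padLoop n (PySem.Int.toBinChars (PySem.List.pyGetD arr2 j 0))) n i hi0 hin]
  rw [PySem.List.foldl_append_singleton_eq_map, List.nil_append]
  congr 1
  apply List.map_congr_left
  intro j hj
  obtain ⟨hj0, hjn⟩ := (PySem.List.mem_pyRange_one).mp hj
  have hmem : (PySem.Set.contains (rowSet n a b) j = true)
      ↔ (PySem.List.pyGetD (padLoop n (PySem.Int.toBinChars a)) j ' ' = '1'
         ∨ PySem.List.pyGetD (padLoop n (PySem.Int.toBinChars b)) j ' ' = '1') := by
    unfold rowSet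
    simp only [PySem.Set.contains]
    rw [List.contains_iff_mem, mem_addMarks, mem_addMarks,
        padLoop_char_one n _ j hj0 hjn, padLoop_char_one n _ j hj0 hjn]
    simp [PySem.Set.empty]
  by_cases h : PySem.List.pyGetD (padLoop n (PySem.Int.toBinChars a)) j ' ' = '1'
      ∨ PySem.List.pyGetD (padLoop n (PySem.Int.toBinChars b)) j ' ' = '1'
  · rw [if_pos h, if_pos (hmem.mpr h)]
  · rw [if_neg h, if_neg (fun hc => h (hmem.mp hc))]
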